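-- pv_equiv track=rewrite | github.com/hwangseoul-netizen/tention-cafe-kr | VISUMOF/visumof_pair_demo.py | flag_before_after
-- ===== SOURCE A (Python) =====
-- def flag_before_after(url: str):
--     if not isinstance(url, str):
--         return "unknown"
--
--     u = url.lower()
--
--     # 쿼리스트링 제거
--     u = u.split("?")[0]
--
--     # 파일명만 추출
--     filename = u.rsplit("/", 1)[-1]
--
--     before_keywords = ["before", "befor", "_b.", "-b.", "_bf", "-bf"]
--     after_keywords = ["after", "afte", "_a.", "-a.", "_af", "-af"]
--
--     for kw in before_keywords:
--         if kw in filename: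
--             return "before"
--
--     for kw in after_keywords:
--         if kw in filename:
--             return "after"
--
--     return "unknown"
-- ===== SOURCE B (Python) =====
-- def flag_before_after(url: str):
--     if not isinstance(url, str):
--         return "unknown"
--
--     u = url.lower()
--     u = u.split("?")[0]
--     filename = u.rsplit("/", 1)[-1]
--
--     before_keywords = ("before", "befor", "_b.", "-b.", "_bf", "-bf")
--     after_keywords = ("after", "afte", "_a.", "-a.", "_af", "-af")
--
--     # single left-to-right scan: at each position test fixed prefixes, keep two flags
--     has_b = False
--     has_a = False
--     for i in range(len(filename)):
--         if filename.startswith(before_keywords, i):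
--             has_b = True
--         if filename.startswith(after_keywords, i):
--             has_a = True
--     return "before" if has_b else ("after" if has_a else "unknown")
-- ===== Notes on version B (the rewrite author's own statement) =====
-- stated objective: alternative
-- what changed: Replaces the two per-keyword substring-membership loops with a single left-to-right scan over filename positions that tests all keywords as fixed prefixes at each position, maintaining two boolean flags and deciding before/after/unknown once at the end.
import Mathlib
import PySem

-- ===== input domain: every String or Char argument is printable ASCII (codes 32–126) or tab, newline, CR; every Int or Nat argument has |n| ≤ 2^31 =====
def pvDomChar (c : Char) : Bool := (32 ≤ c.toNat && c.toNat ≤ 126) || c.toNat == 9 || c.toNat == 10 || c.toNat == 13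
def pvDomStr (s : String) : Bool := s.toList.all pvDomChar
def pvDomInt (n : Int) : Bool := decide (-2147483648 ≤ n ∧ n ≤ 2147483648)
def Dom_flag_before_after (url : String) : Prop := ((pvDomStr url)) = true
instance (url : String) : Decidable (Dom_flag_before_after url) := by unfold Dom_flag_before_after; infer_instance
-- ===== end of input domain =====

-- B replaces A's per-keyword substring loops by one left-to-right scan with prefix tests and two flags; return value only, no side effects.
-- ===== PORT A =====
def pvBeforeKws : List (List Char) :=
  ["before".toList, "befor".toList, "_b.".toList, "-b.".toList, "_bf".toList, "-bf".toList]
def pvAfterKws : List (List Char) :=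
  ["after".toList, "afte".toList, "_a.".toList, "-a.".toList, "_af".toList, "-af".toList]

def flag_before_after (url : String) : String :=
  let u := PySem.Chars.lower url.toList
  let u2 := PySem.List.pyGetD (PySem.Chars.splitOn u ['?']) 0 []  -- u.split("?")[0]
  -- u2.rsplit("/", 1)[-1] ported by hand (exact): the piece after the last '/', or all of u2
  let i := PySem.Chars.rfind u2 ['/']
  let filename := if i = -1 then u2 else u2.drop (i.toNat + 1)
  if pvBeforeKws.any (fun kw => PySem.Chars.isIn kw filename) then "before"
  else if pvAfterKws.any (fun kw => PySem.Chars.isIn kw filename) then "after"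
  else "unknown"

-- ===== PORT B =====
-- the scan loop of Source B, recursing on suffixes: filename.startswith(kw, i) is startswith of the suffix filename.drop i (exact)
def pvScanKws : List Char → Bool → Bool → Bool × Bool
  | [], hb, ha => (hb, ha)
  | c :: rest, hb, ha =>
      pvScanKws rest
        (hb || pvBeforeKws.any (fun kw => PySem.Chars.startswith (c :: rest) kw))
        (ha || pvAfterKws.any (fun kw => PySem.Chars.startswith (c :: rest) kw))

def flag_before_after_alt (url : String) : String :=
  let u := PySem.Chars.lower url.toList
  let u2 := PySem.List.pyGetD (PySem.Chars.splitOn u ['?']) 0 []  -- u.split("?")[0]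
  -- u2.rsplit("/", 1)[-1] ported by hand (exact): the piece after the last '/', or all of u2
  let i := PySem.Chars.rfind u2 ['/']
  let filename := if i = -1 then u2 else u2.drop (i.toNat + 1)
  let r := pvScanKws filename false false
  if r.1 then "before" else if r.2 then "after" else "unknown"

-- ===== PRECONDITION & SPEC =====
def Spec_flag_before_after (url : String) (out : String) : Prop := out = flag_before_after_alt url
instance (url : String) (out : String) : Decidable (Spec_flag_before_after url out) := by unfold Spec_flag_before_after; infer_instance

-- ===== CLAIM (what is proved, stated in full; the proofs are below) =====
def Claim_equal_flag_before_after : Prop := ∀ (url : String), Dom_flag_before_after url → Spec_flag_before_after url (flag_before_after url)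


-- ===== LEMMAS AND PROOFS =====
-- "some nonempty suffix of s starts with a keyword of kws" (the invariant of B's scan, per flag)
def pvAnyKw (kws : List (List Char)) : List Char → Bool
  | [] => false
  | c :: rest => kws.any (fun kw => PySem.Chars.startswith (c :: rest) kw) || pvAnyKw kws rest

theorem pvAnyKw_eq (kws : List (List Char)) (h : ∀ k ∈ kws, k ≠ []) (s : List Char) :
    pvAnyKw kws s = kws.any (fun kw => PySem.Chars.isIn kw s) := by
  induction s with
  | nil =>
    rw [Bool.eq_iff_iff]
    simp only [pvAnyKw, List.any_eq_true, PySem.Chars.isIn_iff_infix, List.infix_nil,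
      Bool.false_eq_true, false_iff, not_exists]
    intro k hk
    exact h k hk.1 hk.2
  | cons c rest ih =>
    rw [Bool.eq_iff_iff]
    simp only [pvAnyKw, ih, Bool.or_eq_true, List.any_eq_true,
      PySem.Chars.startswith_iff, PySem.Chars.isIn_iff_infix, List.infix_cons_iff]
    constructor
    · rintro (⟨k, hk, hp⟩ | ⟨k, hk, hi⟩)
      · exact ⟨k, hk, Or.inl hp⟩
      · exact ⟨k, hk, Or.inr hi⟩
    · rintro ⟨k, hk, hp | hi⟩
      · exact Or.inl ⟨k, hk, hp⟩
      · exact Or.inr ⟨k, hk, hi⟩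

theorem pvScanKws_eq (s : List Char) : ∀ hb ha : Bool,
    pvScanKws s hb ha = (hb || pvAnyKw pvBeforeKws s, ha || pvAnyKw pvAfterKws s) := by
  induction s with
  | nil => intro hb ha; simp [pvScanKws, pvAnyKw]
  | cons c rest ih => intro hb ha; simp [pvScanKws, pvAnyKw, ih, Bool.or_assoc]

-- ===== VERDICT (by name: the statement is the Claim_ definition above) =====
theorem flag_before_after_spec : Claim_equal_flag_before_after := by
  intro url _
  unfold Spec_flag_before_after flag_before_after flag_before_after_alt
  simp only [pvScanKws_eq, Bool.false_or,
    pvAnyKw_eq pvBeforeKws (by decide), pvAnyKw_eq pvAfterKws (by decide)]
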